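-- pv_equiv track=rewrite | github.com/cogito30/py_coding_test | programmers/Lv1/388351.py | solution
-- ===== SOURCE A (Python) =====
-- def solution(schedules, timelogs, startday):
--     answer = 0
--     N = len(schedules)
--     for i in range(N):
--         std_time = schedules[i]
--         std_time_ten = schedules[i] + 10
--         if std_time_ten % 100 >= 60:
--             std_time_ten += 100
--             std_time_ten -= 60
--         if std_time_ten > 2400:
--             std_time_ten = 2400
--         count = 0
--         start = startday - 1
--         for time in timelogs[i]:
--             start += 1
--             if start == 6 or start == 7:
--                 continue
--             if start > 7:
--                 start = 1
--             if time <= std_time_ten: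
--                 count += 1
--             if count == 5:
--                 answer += 1
--     return answer
-- ===== SOURCE B (Python) =====
-- def _grace(sched):
--     """Latest admissible clock-in time: sched plus 10 minutes, HHMM arithmetic,
--     never past midnight."""
--     g = sched + 10
--     if g % 100 >= 60:
--         g += 40
--     return min(g, 2400)
--
-- def _running_totals(flags):
--     """Prefix sums of a list of booleans."""
--     total = 0
--     out = []
--     for f in flags:
--         total += f
--         out.append(total)
--     return out
--
-- def solution(schedules, timelogs, startday):
--     # The day-of-week walk is the same for every employee, so build the
--     # working-day mask once up front.
--     width = max((len(logs) for logs in timelogs), default=0)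
--     mask = []
--     day = startday - 1
--     for _ in range(width):
--         day += 1
--         if day in (6, 7):
--             mask.append(False)
--         else:
--             if day > 7:
--                 day = 1
--             mask.append(True)
--     # An employee scores one point for every working day on which their
--     # cumulative on-time total stands at exactly five.
--     answer = 0
--     for sched, logs in zip(schedules, timelogs):
--         g = _grace(sched)
--         ontime = [t <= g for d, t in zip(mask, logs) if d]
--         answer += _running_totals(ontime).count(5)
--     return answer
-- ===== Notes on version B (the rewrite author's own statement) =====
-- stated objective: alternative
-- what changed: B builds the working-day mask once for all employees (A re-walks the mutable day state per employee) and replaces A's three-variable running state machine with a per-employee pipeline: on-time flags of the working-day logs, their prefix totals, and a count of the prefixes whose total is exactly five. Pre_ excludes only inputs where A raises IndexError (fewer timelogs than schedules).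
import Mathlib
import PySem

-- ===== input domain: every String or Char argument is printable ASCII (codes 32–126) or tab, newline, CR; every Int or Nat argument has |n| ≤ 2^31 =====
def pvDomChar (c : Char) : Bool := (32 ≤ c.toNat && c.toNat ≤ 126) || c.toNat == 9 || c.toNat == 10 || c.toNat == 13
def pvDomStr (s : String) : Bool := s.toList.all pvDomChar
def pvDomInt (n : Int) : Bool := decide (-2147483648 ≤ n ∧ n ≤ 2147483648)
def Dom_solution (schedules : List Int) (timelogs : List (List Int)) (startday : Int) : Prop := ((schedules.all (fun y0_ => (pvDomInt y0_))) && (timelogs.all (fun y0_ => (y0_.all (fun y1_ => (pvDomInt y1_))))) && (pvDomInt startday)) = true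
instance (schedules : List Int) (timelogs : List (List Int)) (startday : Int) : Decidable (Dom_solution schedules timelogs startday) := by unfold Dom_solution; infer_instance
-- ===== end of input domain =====

-- B builds the working-day mask once and replaces A's mutable three-variable state machine by a
-- per-employee pipeline (on-time flags, prefix totals, count of totals equal to five); same cost.


-- ===== PORT A =====
-- A's grace-time computation (schedules[i]+10 with minute carry and 2400 cap)
def stdA (t : Int) : Int :=
  let std_time_ten := t + 10
  let std_time_ten := if 60 ≤ PySem.Int.mod std_time_ten 100 then std_time_ten + 100 - 60 else std_time_ten
  if 2400 < std_time_ten then 2400 else std_time_ten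

-- A's inner-loop body over state (answer, count, start)
def stepA (std : Int) (st : Int × Int × Int) (time : Int) : Int × Int × Int :=
  let start := st.2.2 + 1
  if start = 6 ∨ start = 7 then (st.1, st.2.1, start)
  else
    let start := if 7 < start then 1 else start
    let count := if time ≤ std then st.2.1 + 1 else st.2.1
    let answer := if count = 5 then st.1 + 1 else st.1
    (answer, count, start)

def solution (schedules : List Int) (timelogs : List (List Int)) (startday : Int) : Int :=
  (PySem.List.pyRange 0 (schedules.length : Int) 1).foldl
    (fun answer i =>
      (((PySem.List.pyGet? timelogs i).getD []).foldl
        (stepA (stdA ((PySem.List.pyGet? schedules i).getD 0)))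
        (answer, 0, startday - 1)).1)
    0

-- ===== PORT B =====
-- _grace: sched + 10 with minute carry (+40) and 2400 cap
def graceAlt (sched : Int) : Int :=
  let g := sched + 10
  let g := if 60 ≤ PySem.Int.mod g 100 then g + 40 else g
  min g 2400

-- _running_totals: prefix sums of a boolean list (carrying the running total)
def runningTotals (total : Int) : List Bool → List Int
  | [] => []
  | f :: r =>
    let total := total + (if f then 1 else 0)
    total :: runningTotals total r

-- the working-day mask: one step of the day walk per log index
def weekdayMask (s : Int) : Nat → List Bool
  | 0 => []
  | n + 1 =>
    let s' := s + 1
    if s' = 6 ∨ s' = 7 then false :: weekdayMask s' n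
    else true :: weekdayMask (if 7 < s' then 1 else s') n

-- ontime = [t <= g for d, t in zip(mask, logs) if d]
def ontimeOf (mask : List Bool) (g : Int) (logs : List Int) : List Bool :=
  ((mask.zip logs).filter (fun p => p.1)).map (fun p => decide (p.2 ≤ g))

def solution_alt (schedules : List Int) (timelogs : List (List Int)) (startday : Int) : Int :=
  let width := (timelogs.map (fun t => t.length)).foldl max 0
  let mask := weekdayMask (startday - 1) width
  (schedules.zip timelogs).foldl
    (fun answer p =>
      answer + PySem.List.count (runningTotals 0 (ontimeOf mask (graceAlt p.1) p.2)) 5)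
    0

-- ===== PRECONDITION & SPEC =====
-- A indexes timelogs[i] for every i < len(schedules); Pre_ excludes exactly the
-- inputs where that raises IndexError (nothing else).
def Pre_solution (schedules : List Int) (timelogs : List (List Int)) (startday : Int) : Prop :=
  schedules.length ≤ timelogs.length
instance (schedules : List Int) (timelogs : List (List Int)) (startday : Int) : Decidable (Pre_solution schedules timelogs startday) := by unfold Pre_solution; infer_instance

def pvWitness_solution : List Int × List (List Int) × Int :=
  ([1000], [[900, 900, 900, 900, 900]], 1)

def Spec_solution (schedules : List Int) (timelogs : List (List Int)) (startday : Int) (out : Int) : Prop := out = solution_alt schedules timelogs startday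
instance (schedules : List Int) (timelogs : List (List Int)) (startday : Int) (out : Int) : Decidable (Spec_solution schedules timelogs startday out) := by unfold Spec_solution; infer_instance

-- ===== CLAIM (what is proved, stated in full; the proofs are below) =====
def Claim_equal_solution : Prop := ∀ (schedules : List Int) (timelogs : List (List Int)) (startday : Int), Dom_solution schedules timelogs startday → Pre_solution schedules timelogs startday → Spec_solution schedules timelogs startday (solution schedules timelogs startday)

-- ===== LEMMAS AND PROOFS =====

-- the on-time flags A's inner loop effectively processes (weekends skipped)
def oksWalk (g s : Int) : List Int → List Bool
  | [] => []
  | t :: r =>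
    let s' := s + 1
    if s' = 6 ∨ s' = 7 then oksWalk g s' r
    else decide (t ≤ g) :: oksWalk g (if 7 < s' then 1 else s') r

-- number of prefixes of oks whose running true-count (started at c) equals 5
def cnt5 (c : Int) : List Bool → Int
  | [] => 0
  | b :: r =>
    let c' := if b then c + 1 else c
    (if c' = 5 then 1 else 0) + cnt5 c' r

theorem graceAlt_eq_stdA (t : Int) : graceAlt t = stdA t := by
  simp only [graceAlt, stdA, min_def]
  split_ifs <;> omega

theorem cnt5_eq_count (oks : List Bool) : ∀ c : Int,
    cnt5 c oks = PySem.List.count (runningTotals c oks) 5 := by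
  induction oks with
  | nil => intro c; simp [cnt5, runningTotals, PySem.List.count]
  | cons b r ih =>
    intro c
    have he : c + (if b = true then (1:Int) else 0) = (if b = true then c + 1 else c) := by
      split <;> ring
    simp only [cnt5, runningTotals, ih, PySem.List.count, he, List.count_cons]
    by_cases h : (if b = true then c + 1 else c) = 5 <;> simp [h] <;> omega

theorem ontimeOf_weekdayMask (logs : List Int) : ∀ (n : Nat) (s g : Int), logs.length ≤ n →
    ontimeOf (weekdayMask s n) g logs = oksWalk g s logs := by
  induction logs with
  | nil => intro n s g _; simp [ontimeOf, oksWalk]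
  | cons t r ih =>
    intro n s g hn
    cases n with
    | zero => simp at hn
    | succ m =>
      simp only [weekdayMask, oksWalk]
      by_cases h : s + 1 = 6 ∨ s + 1 = 7
      · rw [if_pos h, if_pos h]
        simpa [ontimeOf] using ih m (s + 1) g (by simpa using hn)
      · rw [if_neg h, if_neg h]
        simpa [ontimeOf] using ih m (if 7 < s + 1 then 1 else s + 1) g (by simpa using hn)

theorem innerA_eq_cnt5 (g : Int) (logs : List Int) : ∀ (ans c s : Int),
    (logs.foldl (stepA g) (ans, c, s)).1 = ans + cnt5 c (oksWalk g s logs) := by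
  induction logs with
  | nil => intro ans c s; simp [oksWalk, cnt5]
  | cons t r ih =>
    intro ans c s
    simp only [List.foldl_cons, stepA, oksWalk]
    by_cases h : s + 1 = 6 ∨ s + 1 = 7
    · rw [if_pos h, if_pos h]; exact ih ans c (s + 1)
    · rw [if_neg h, if_neg h]
      by_cases ht : t ≤ g
      · simp only [if_pos ht, decide_eq_true ht, cnt5]
        rw [ih _ _ _]
        norm_num
        split_ifs <;> ring
      · simp only [if_neg ht, decide_eq_false ht, cnt5]
        rw [ih _ _ _]
        norm_num
        split_ifs <;> ring

theorem foldl_range_zip (f : Int → Int → List Int → Int) :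
    ∀ (xs : List Int) (ys : List (List Int)) (a : Int), xs.length ≤ ys.length →
      (List.range xs.length).foldl (fun acc k => f acc ((xs[k]?).getD 0) ((ys[k]?).getD [])) a
        = (xs.zip ys).foldl (fun acc p => f acc p.1 p.2) a := by
  intro xs
  induction xs with
  | nil => intro ys a _; simp
  | cons x xs' ih =>
    intro ys a h
    cases ys with
    | nil => simp at h
    | cons y ys' =>
      simp only [List.length_cons, List.range_succ_eq_map, List.foldl_cons, List.foldl_map,
        List.zip_cons_cons, List.getElem?_cons_zero, Option.getD_some]
      exact ih ys' (f a x y) (by simpa using h)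

theorem maskLen_bound (timelogs : List (List Int)) (t : List Int) (ht : t ∈ timelogs) :
    t.length ≤ (timelogs.map (fun t => t.length)).foldl max 0 :=
  (PySem.List.le_foldl_max (timelogs.map (fun t => t.length)) 0).2 _ (List.mem_map_of_mem ht)

-- ===== VERDICT (by name: the statement is the Claim_ definition above) =====
theorem solution_spec : Claim_equal_solution := by
  intro schedules timelogs startday _ hpre
  unfold Spec_solution solution solution_alt
  rw [PySem.List.pyRange_one]
  simp only [sub_zero, Int.toNat_natCast, List.foldl_map, zero_add, PySem.List.pyGet?_natCast]
  rw [foldl_range_zip (fun acc sched logs =>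
        (logs.foldl (stepA (stdA sched)) (acc, 0, startday - 1)).1) schedules timelogs 0 hpre]
  apply PySem.List.foldl_congr_mem
  intro a p hp
  have hb : p.2.length ≤ List.foldl (fun (x : Nat) (y : List Int) => max x y.length) 0 timelogs := by
    rw [show List.foldl (fun (x : Nat) (y : List Int) => max x y.length) 0 timelogs
          = (timelogs.map (fun t => t.length)).foldl max 0 from (List.foldl_map ..).symm]
    exact maskLen_bound _ _ (List.of_mem_zip hp).2
  rw [innerA_eq_cnt5, ← cnt5_eq_count, graceAlt_eq_stdA,
      ontimeOf_weekdayMask p.2 _ (startday - 1) (stdA p.1) hb]
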